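-- pv_equiv track=rewrite | github.com/joeljohansson99/adventofcode | 2017/src/day23.py | part2
-- ===== SOURCE A (Python) =====
-- def part2(input):
--     b = 105700
--     c = 122700
--     h = 0
--     while b <= c:
--         f = 1
--         for i in range(2, b):
--             if b%i == 0:
--                 f = 0
--                 break
--
--         if f == 0:
--             h+=1
--         b+=17
--
--     return h
-- ===== SOURCE B (Python) =====
-- def part2(input):
--     # B: trial division only up to sqrt(b) instead of all the way to b (faster).
--     h = 0
--     for b in range(105700, 122701, 17):
--         comp = False
--         i = 2
--         while i * i <= b:
--             if b % i == 0:
--                 comp = True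
--                 break
--             i += 1
--         if comp:
--             h += 1
--     return h
-- ===== Notes on version B (the rewrite author's own statement) =====
-- stated objective: faster
-- what changed: B tests each b for compositeness by trial division only up to sqrt(b) instead of scanning every i in range(2, b), iterating over the stepped range with a for loop instead of a manual while counter.
import Mathlib
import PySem

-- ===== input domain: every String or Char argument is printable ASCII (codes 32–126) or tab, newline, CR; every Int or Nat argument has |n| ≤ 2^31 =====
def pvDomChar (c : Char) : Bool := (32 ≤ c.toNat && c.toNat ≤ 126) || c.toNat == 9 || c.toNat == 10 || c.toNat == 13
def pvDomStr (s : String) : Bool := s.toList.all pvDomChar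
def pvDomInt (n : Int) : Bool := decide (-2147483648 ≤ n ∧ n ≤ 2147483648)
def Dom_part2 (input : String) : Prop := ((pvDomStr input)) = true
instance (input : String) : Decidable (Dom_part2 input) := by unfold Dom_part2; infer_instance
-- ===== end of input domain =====

-- B replaces A's trial division over all of range(2, b) by trial division only up to sqrt(b) (faster).


-- ===== PORT A =====
-- "f = 1; for i in range(2, b): if b % i == 0: f = 0; break" — returns the final f, scan starting at i
def part2InnerF (b i : Int) : Int :=
  if i < b then
    if PySem.Int.mod b i == 0 then 0
    else part2InnerF b (i + 1)
  else 1
termination_by (b - i).toNat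
decreasing_by omega

-- "while b <= c: f = …; if f == 0: h += 1; b += 17"
def part2Loop (b c h : Int) : Int :=
  if b ≤ c then
    let f := part2InnerF b 2
    part2Loop (b + 17) c (if f == 0 then h + 1 else h)
  else h
termination_by (c + 1 - b).toNat
decreasing_by omega

def part2 (input : String) : Int := part2Loop 105700 122700 0

-- ===== PORT B =====
-- termination helper for the sqrt-bounded while loop
theorem pv_le_mul_self (i : Int) : i ≤ i * i := by
  rcases le_or_gt 0 i with h | h
  · nlinarith
  · nlinarith

-- "i = 2; while i * i <= b: if b % i == 0: comp = True; break; i += 1"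
def isCompLoop (n i : Int) : Bool :=
  if i * i ≤ n then
    if PySem.Int.mod n i == 0 then true
    else isCompLoop n (i + 1)
  else false
termination_by (n + 1 - i).toNat
decreasing_by
  have := pv_le_mul_self i
  omega

def part2_alt (input : String) : Int :=
  (PySem.List.pyRange 105700 122701 17).foldl
    (fun h b => if isCompLoop b 2 then h + 1 else h) 0

-- ===== PRECONDITION & SPEC =====
def Spec_part2 (input : String) (out : Int) : Prop := out = part2_alt input
instance (input : String) (out : Int) : Decidable (Spec_part2 input out) := by unfold Spec_part2; infer_instance

-- ===== CLAIM (what is proved, stated in full; the proofs are below) =====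
def Claim_equal_part2 : Prop := ∀ (input : String), Dom_part2 input → Spec_part2 input (part2 input)

-- ===== LEMMAS AND PROOFS =====

-- A's inner scan returns 0 iff a divisor of b exists in [i, b)
theorem part2InnerF_eq_zero_iff (b i : Int) : part2InnerF b i = 0 ↔
    ∃ d, i ≤ d ∧ d < b ∧ PySem.Int.mod b d = 0 := by
  induction i using part2InnerF.induct (b := b) with
  | case1 i hlt hmod =>
    rw [part2InnerF, if_pos hlt, if_pos hmod]
    simp only [beq_iff_eq] at hmod
    exact iff_of_true rfl ⟨i, le_refl i, hlt, hmod⟩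
  | case2 i hlt hmod ih =>
    rw [part2InnerF, if_pos hlt, if_neg hmod]
    simp only [beq_iff_eq] at hmod
    rw [ih]
    constructor
    · rintro ⟨d, hd, h2, h3⟩; exact ⟨d, by omega, h2, h3⟩
    · rintro ⟨d, hd, h2, h3⟩
      refine ⟨d, ?_, h2, h3⟩
      rcases eq_or_lt_of_le hd with rfl | h
      · exact absurd h3 hmod
      · omega
  | case3 i hlt =>
    rw [part2InnerF, if_neg hlt]
    constructor
    · intro h; exact absurd h (by norm_num)
    · rintro ⟨d, hd, h2, h3⟩; omega

-- B's sqrt-bounded scan returns true iff a divisor d ≥ i with d*d ≤ n exists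
theorem isCompLoop_eq_true_iff (n i : Int) : 0 ≤ i → (isCompLoop n i = true ↔
    ∃ d, i ≤ d ∧ d * d ≤ n ∧ PySem.Int.mod n d = 0) := by
  induction i using isCompLoop.induct (n := n) with
  | case1 i hle hmod =>
    intro _
    rw [isCompLoop, if_pos hle, if_pos hmod]
    simp only [beq_iff_eq] at hmod
    exact iff_of_true rfl ⟨i, le_refl i, hle, hmod⟩
  | case2 i hle hmod ih =>
    intro hi
    rw [isCompLoop, if_pos hle, if_neg hmod]
    simp only [beq_iff_eq] at hmod
    rw [ih (by omega)]
    constructor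
    · rintro ⟨d, hd, h2, h3⟩; exact ⟨d, by omega, h2, h3⟩
    · rintro ⟨d, hd, h2, h3⟩
      refine ⟨d, ?_, h2, h3⟩
      rcases eq_or_lt_of_le hd with rfl | h
      · exact absurd h3 hmod
      · omega
  | case3 i hle =>
    intro hi
    rw [isCompLoop, if_neg hle]
    constructor
    · intro h; exact absurd h (by norm_num)
    · rintro ⟨d, hd, h2, h3⟩
      have hii : i * i ≤ n := le_trans (mul_le_mul hd hd hi (le_trans hi hd)) h2
      exact absurd hii hle

-- a number ≥ 2 has a proper divisor iff it has one below its square root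
theorem divisor_sqrt_iff (n : Int) (hn : 2 ≤ n) :
    (∃ d, 2 ≤ d ∧ d < n ∧ PySem.Int.mod n d = 0) ↔
    (∃ d, 2 ≤ d ∧ d * d ≤ n ∧ PySem.Int.mod n d = 0) := by
  constructor
  · rintro ⟨d, hd2, hdn, hmod⟩
    rcases le_or_gt (d * d) n with h | h
    · exact ⟨d, hd2, h, hmod⟩
    · rw [PySem.Int.mod_eq_zero_iff_dvd] at hmod
      obtain ⟨e, he⟩ := hmod
      refine ⟨e, ?_, ?_, ?_⟩
      · nlinarith
      · nlinarith
      · rw [PySem.Int.mod_eq_zero_iff_dvd]; exact ⟨d, by linarith [he]⟩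
  · rintro ⟨d, hd2, hdd, hmod⟩
    exact ⟨d, hd2, by nlinarith, hmod⟩

-- for b ≥ 2 one step of A's tally equals one step of B's tally
theorem step_eq (b h : Int) (hb : 2 ≤ b) :
    (if part2InnerF b 2 == 0 then h + 1 else h) = (if isCompLoop b 2 then h + 1 else h) := by
  have h1 := part2InnerF_eq_zero_iff b 2
  have h2 := isCompLoop_eq_true_iff b 2 (by norm_num)
  have h3 := divisor_sqrt_iff b hb
  by_cases hc : isCompLoop b 2 = true
  · have h0 : part2InnerF b 2 = 0 := h1.mpr (h3.mpr (h2.mp hc))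
    simp [h0, hc]
  · have h0 : ¬ part2InnerF b 2 = 0 := fun h0 => hc (h2.mpr (h3.mp (h1.mp h0)))
    rw [if_neg (by simpa using h0), if_neg hc]

-- splitting the step-17 range at its head
theorem pyRange17_nil (b u : Int) (h : u ≤ b) : PySem.List.pyRange b u 17 = [] := by
  rw [PySem.List.pyRange_of_pos b u (by norm_num)]
  simp [show ¬ b < u by omega]

theorem pyRange17_cons (b u : Int) (h : b < u) :
    PySem.List.pyRange b u 17 = b :: PySem.List.pyRange (b + 17) u 17 := by
  rw [PySem.List.pyRange_of_pos b u (by norm_num),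
      PySem.List.pyRange_of_pos (b + 17) u (by norm_num)]
  by_cases h2 : b + 17 < u
  · rw [if_pos h, if_pos h2]
    have hN : ((u - b + 17 - 1) / 17).toNat = ((u - (b + 17) + 17 - 1) / 17).toNat + 1 := by
      omega
    rw [hN, List.range_succ_eq_map, List.map_cons, List.map_map]
    refine congrArg₂ List.cons (by simp) ?_
    apply List.map_congr_left
    intro k _
    simp [Function.comp]
    ring
  · rw [if_pos h, if_neg h2]
    have hN : ((u - b + 17 - 1) / 17).toNat = 1 := by omega
    rw [hN]
    simp

-- A's while loop is a fold of A's per-step tally over the stepped range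
theorem loop_eq (c : Int) (b h : Int) : part2Loop b c h =
    (PySem.List.pyRange b (c + 1) 17).foldl
      (fun h x => if part2InnerF x 2 == 0 then h + 1 else h) h := by
  induction b, h using part2Loop.induct (c := c) with
  | case1 b h hbc f ih =>
    rw [part2Loop, if_pos hbc, pyRange17_cons b (c + 1) (by omega), List.foldl_cons]
    exact ih
  | case2 b h hbc =>
    rw [part2Loop, if_neg hbc, pyRange17_nil b (c + 1) (by omega), List.foldl_nil]

-- ===== VERDICT (by name: the statement is the Claim_ definition above) =====
theorem part2_spec : Claim_equal_part2 := by
  intro input _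
  unfold Spec_part2 part2 part2_alt
  rw [loop_eq 122700 105700 0, show (122700 : Int) + 1 = 122701 by norm_num]
  apply PySem.List.foldl_congr_mem
  intro acc x hx
  have hm := (PySem.List.mem_pyRange_iff_of_pos (by norm_num) x).mp hx
  exact step_eq x acc (by omega)
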